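-- pv_equiv track=rewrite | github.com/EugeneDevastator/Python-PlotX | ParametricFunctionGenerator/ParaGen.py | litToDict
-- ===== SOURCE A (Python) =====
-- def litToDict(st,dictName='vd'):
--     if type(st) != str:
--         st=str(st)
--
--     st2= '_'+st+'_'
--     res =''
--     for i in range(len(st)):
--         c= st2[i+1]
--         if c.isalpha():
--             if not (st2[i].isalpha() or st2[i+2].isalpha()):
--                res = res + dictName+'["'+c+'"]'
--                continue
--         res = res + c
--     return res
-- ===== SOURCE B (Python) =====
-- from itertools import groupby
--
-- def litToDict(st, dictName='vd'):
--     if type(st) != str: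
--         st = str(st)
--     pieces = []
--     for isalpha, grp in groupby(st, key=str.isalpha):
--         run = ''.join(grp)
--         if isalpha and len(run) == 1:
--             pieces.append(dictName + '["' + run + '"]')
--         else:
--             pieces.append(run)
--     return ''.join(pieces)
-- ===== Notes on version B (the rewrite author's own statement) =====
-- stated objective: idiomatic
-- what changed: Instead of padding the string with underscore sentinels and testing a three-character window at every index, B splits the string into maximal runs of equal isalpha via itertools.groupby and wraps exactly the alphabetic runs of length 1.
import Mathlib
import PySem

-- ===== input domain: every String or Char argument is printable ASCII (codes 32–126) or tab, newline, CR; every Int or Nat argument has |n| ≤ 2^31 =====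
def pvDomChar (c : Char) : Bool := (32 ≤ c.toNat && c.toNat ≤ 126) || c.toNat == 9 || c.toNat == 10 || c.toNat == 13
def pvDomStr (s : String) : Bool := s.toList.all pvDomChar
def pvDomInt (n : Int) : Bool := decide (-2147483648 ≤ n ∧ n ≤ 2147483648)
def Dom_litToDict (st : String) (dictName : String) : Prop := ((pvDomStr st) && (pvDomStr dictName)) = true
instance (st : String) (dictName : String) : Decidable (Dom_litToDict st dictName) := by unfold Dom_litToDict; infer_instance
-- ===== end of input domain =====

-- B replaces A's sentinel-padded index lookahead by splitting the string into maximal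
-- isalpha-runs (itertools.groupby) and wrapping exactly the alphabetic runs of
-- length 1; objective: a cleaner, more idiomatic decomposition (same cost).

-- ===== PORT A =====
-- the loop body of A, verbatim (res = res + … in each branch)
def Abody (dn st2 : List Char) (res : List Char) (i : Int) : List Char :=
  let c := PySem.List.pyGetD st2 (i + 1) '_'
  if PySem.Chars.isalpha c then
    if !(PySem.Chars.isalpha (PySem.List.pyGetD st2 i '_') ||
         PySem.Chars.isalpha (PySem.List.pyGetD st2 (i + 2) '_')) then
      res ++ dn ++ ['[', '"'] ++ [c] ++ ['"', ']']
    else res ++ [c]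
  else res ++ [c]

def litToDict (st : String) (dictName : String) : String :=
  let s := st.toList
  let st2 := '_' :: s ++ ['_']
  String.ofList ((PySem.List.pyRange 0 (s.length : Int) 1).foldl (Abody dictName.toList st2) [])

-- ===== PORT B =====
-- itertools.groupby(st, key=str.isalpha): maximal runs of equal isalpha
def groupRuns : List Char → List (List Char)
  | [] => []
  | c :: cs =>
      (c :: cs.takeWhile (fun d => PySem.Chars.isalpha d == PySem.Chars.isalpha c)) ::
      groupRuns (cs.dropWhile (fun d => PySem.Chars.isalpha d == PySem.Chars.isalpha c))
  termination_by l => l.length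
  decreasing_by simpa using Nat.lt_succ_of_le (List.length_dropWhile_le _ _)

-- one piece per (key, run) pair of the groupby loop
def render (dn : List Char) (run : List Char) : List Char :=
  if PySem.Chars.isalpha (run.headD '_') && run.length == 1 then
    dn ++ ['[', '"'] ++ [run.headD '_'] ++ ['"', ']']
  else run

def litToDict_alt (st : String) (dictName : String) : String :=
  String.ofList (((groupRuns st.toList).map (render dictName.toList)).flatten)

-- ===== PRECONDITION & SPEC =====
def Spec_litToDict (st : String) (dictName : String) (out : String) : Prop := out = litToDict_alt st dictName
instance (st : String) (dictName : String) (out : String) : Decidable (Spec_litToDict st dictName out) := by unfold Spec_litToDict; infer_instance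

-- ===== CLAIM (what is proved, stated in full; the proofs are below) =====
def Claim_equal_litToDict : Prop := ∀ (st : String) (dictName : String), Dom_litToDict st dictName → Spec_litToDict st dictName (litToDict st dictName)

-- ===== LEMMAS AND PROOFS =====

-- what A emits for one character, as a function of the window (prev, c, next)
def wpiece (dn : List Char) (prev c next : Char) : List Char :=
  if PySem.Chars.isalpha c then
    if !(PySem.Chars.isalpha prev || PySem.Chars.isalpha next) then
      dn ++ ['[', '"'] ++ [c] ++ ['"', ']']
    else [c]
  else [c]

-- A's whole output as a window map over the remaining suffix
def wmap (dn : List Char) : Char → List Char → List Char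
  | _, [] => []
  | prev, c :: rest => wpiece dn prev c (rest.headD '_') ++ wmap dn c rest

theorem getD_cons_length (pre : List Char) (x d : Char) :
    (x :: pre).getD pre.length d = pre.getLastD x := by
  induction pre generalizing x with
  | nil => rfl
  | cons a pre' ih =>
    show (a :: pre').getD pre'.length d = _
    rw [ih a, List.getLastD_cons]

theorem A_loop (dn l : List Char) (suf pre res : List Char) (h : l = pre ++ suf) :
    (PySem.List.pyRange (pre.length : Int) (l.length : Int) 1).foldl
        (Abody dn ('_' :: l ++ ['_'])) res
      = res ++ wmap dn (pre.getLastD '_') suf := by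
  induction suf generalizing pre res with
  | nil =>
    rw [PySem.List.pyRange_one_eq_nil (by simp [h])]
    simp [wmap]
  | cons c rest ih =>
    have hlen : l.length = pre.length + rest.length + 1 := by simp [h]; omega
    have hlt : (pre.length : Int) < (l.length : Int) := by
      rw [hlen]; push_cast; omega
    rw [PySem.List.pyRange_one_cons hlt, List.foldl_cons]
    have hsplit : '_' :: l ++ ['_'] = ('_' :: pre) ++ (c :: (rest ++ ['_'])) := by
      simp [h]
    have g1 : PySem.List.pyGetD ('_' :: l ++ ['_']) ((pre.length : Int) + 1) '_' = c := by
      have hcast : ((pre.length : Int) + 1) = ((pre.length + 1 : Nat) : Int) := by push_cast; ring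
      rw [hcast, PySem.List.pyGetD_natCast, hsplit,
        List.getD_append_right _ _ _ _ (by simp)]
      simp
    have g2 : PySem.List.pyGetD ('_' :: l ++ ['_']) ((pre.length : Int)) '_' =
        pre.getLastD '_' := by
      rw [PySem.List.pyGetD_natCast, hsplit]
      rw [List.getD_append _ _ _ _ (by simp)]
      exact getD_cons_length pre '_' '_'
    have g3 : PySem.List.pyGetD ('_' :: l ++ ['_']) ((pre.length : Int) + 2) '_' =
        rest.headD '_' := by
      have hcast : ((pre.length : Int) + 2) = ((pre.length + 2 : Nat) : Int) := by push_cast; ring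
      rw [hcast, PySem.List.pyGetD_natCast, hsplit,
        List.getD_append_right _ _ _ _ (by simp)]
      have : pre.length + 2 - ('_' :: pre).length = 1 := by simp
      rw [this]
      show (rest ++ ['_']).getD 0 '_' = rest.headD '_'
      cases rest <;> simp
    have hbody : Abody dn ('_' :: l ++ ['_']) res (pre.length : Int) =
        res ++ wpiece dn (pre.getLastD '_') c (rest.headD '_') := by
      unfold Abody wpiece
      rw [g1, g2, g3]
      split_ifs <;> simp_all
    rw [hbody]
    have hpre' : l = (pre ++ [c]) ++ rest := by simp [h]
    have hcast2 : (pre.length : Int) + 1 = ((pre ++ [c]).length : Nat) := by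
      simp
    rw [hcast2, ih (pre ++ [c]) _ hpre', List.getLastD_concat]
    show _ = res ++ wmap dn (pre.getLastD '_') (c :: rest)
    rw [wmap]
    simp

theorem Ca_getLastD (t : List Char) (p : Char)
    (h : ∀ x ∈ t, PySem.Chars.isalpha x = PySem.Chars.isalpha p) :
    PySem.Chars.isalpha (t.getLastD p) = PySem.Chars.isalpha p := by
  cases ht : t with
  | nil => simp
  | cons a t' =>
    have hne : t ≠ [] := by simp [ht]
    have heq : t.getLastD p = t.getLast hne := by
      simp [List.getLastD_eq_getLast?, List.getLast?_eq_some_getLast hne]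
    rw [← ht, heq]
    exact h _ (List.getLast_mem hne)

theorem wmap_run (dn : List Char) (t : List Char) (p : Char) (d : List Char)
    (h : ∀ x ∈ t, PySem.Chars.isalpha x = PySem.Chars.isalpha p) :
    wmap dn p (t ++ d) = t ++ wmap dn (t.getLastD p) d := by
  induction t generalizing p with
  | nil => simp
  | cons x t' ih =>
    have hx : PySem.Chars.isalpha x = PySem.Chars.isalpha p := h x (by simp)
    have hrest : ∀ y ∈ t', PySem.Chars.isalpha y = PySem.Chars.isalpha x :=
      fun y hy => (h y (by simp [hy])).trans hx.symm
    have hw : wpiece dn p x ((t' ++ d).headD '_') = [x] := by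
      unfold wpiece
      cases hc : PySem.Chars.isalpha x with
      | false => simp
      | true => simp [hx ▸ hc]
    show wpiece dn p x ((t' ++ d).headD '_') ++ wmap dn x (t' ++ d) = _
    rw [hw, ih x hrest, List.getLastD_cons]
    simp

theorem wmap_groupRuns (dn : List Char) (l : List Char) (prev : Char)
    (h : PySem.Chars.isalpha prev = false ∨ PySem.Chars.isalpha (l.headD '_') = false) :
    wmap dn prev l = ((groupRuns l).map (render dn)).flatten := by
  induction l using groupRuns.induct generalizing prev with
  | case1 => simp [groupRuns, wmap]
  | case2 c cs ih =>
    have hcs : cs.takeWhile (fun d => PySem.Chars.isalpha d == PySem.Chars.isalpha c) ++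
        cs.dropWhile (fun d => PySem.Chars.isalpha d == PySem.Chars.isalpha c) = cs :=
      List.takeWhile_append_dropWhile
    set t := cs.takeWhile (fun d => PySem.Chars.isalpha d == PySem.Chars.isalpha c) with htdef
    set dd := cs.dropWhile (fun d => PySem.Chars.isalpha d == PySem.Chars.isalpha c) with hddef
    have ht : ∀ x ∈ t, PySem.Chars.isalpha x = PySem.Chars.isalpha c := by
      intro x hx
      have := List.mem_takeWhile_imp hx
      simpa using this
    have hddhead : PySem.Chars.isalpha (dd.headD '_') = false ∨
        PySem.Chars.isalpha (dd.headD '_') = !(PySem.Chars.isalpha c) := by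
      cases hdd : dd with
      | nil => left; decide
      | cons y ys =>
        right
        have h2 : dd ≠ [] := by simp [hdd]
        have := List.head_dropWhile_not
          (p := fun d => PySem.Chars.isalpha d == PySem.Chars.isalpha c) (l := cs) (hddef ▸ h2)
        simp only [← hddef, hdd] at this
        simp only [List.headD_cons]
        cases hyc : PySem.Chars.isalpha y <;> cases hcc : PySem.Chars.isalpha c <;>
          simp_all
    have hlast : PySem.Chars.isalpha (t.getLastD c) = PySem.Chars.isalpha c :=
      Ca_getLastD t c ht
    have hgr : groupRuns (c :: cs) = (c :: t) :: groupRuns dd := by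
      rw [groupRuns]
    have hwm : wmap dn prev (c :: cs) =
        wpiece dn prev c (cs.headD '_') ++ wmap dn c cs := rfl
    have hih : wmap dn (t.getLastD c) dd = ((groupRuns dd).map (render dn)).flatten := by
      apply ih
      cases hc : PySem.Chars.isalpha c with
      | false => exact Or.inl (hlast.trans hc)
      | true =>
        right
        rcases hddhead with h1 | h1
        · exact h1
        · rw [h1, hc]; rfl
    have hwm2 : wmap dn c cs = t ++ ((groupRuns dd).map (render dn)).flatten := by
      rw [← hcs, wmap_run dn t c dd ht, hih]
    rw [hgr, hwm, hwm2, List.map_cons, List.flatten_cons]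
    cases hc : PySem.Chars.isalpha c with
    | false =>
      have hw : wpiece dn prev c (cs.headD '_') = [c] := by unfold wpiece; simp [hc]
      have hr : render dn (c :: t) = c :: t := by unfold render; simp [hc]
      rw [hw, hr]
      simp
    | true =>
      have hprev : PySem.Chars.isalpha prev = false := by
        rcases h with h1 | h1
        · exact h1
        · simp only [List.headD_cons] at h1; rw [hc] at h1; cases h1
      cases htc : t with
      | nil =>
        have hcsdd : cs = dd := by rw [← hcs, htc]; rfl
        have hnext : PySem.Chars.isalpha (cs.headD '_') = false := by
          rw [hcsdd]
          rcases hddhead with h1 | h1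
          · exact h1
          · rw [h1, hc]; rfl
        have hw : wpiece dn prev c (cs.headD '_') =
            dn ++ ['[', '"'] ++ [c] ++ ['"', ']'] := by
          unfold wpiece; rw [hc, hprev, hnext]; simp
        rw [hw]
        unfold render
        simp [hc]
      | cons a t' =>
        have hhead : cs.headD '_' = a := by rw [← hcs, htc]; rfl
        have ha : PySem.Chars.isalpha a = true := (ht a (by simp [htc])).trans hc
        have hw : wpiece dn prev c (cs.headD '_') = [c] := by
          unfold wpiece; rw [hhead, hc, hprev, ha]; simp
        rw [hw]
        unfold render
        simp

-- ===== VERDICT (by name: the statement is the Claim_ definition above) =====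
theorem litToDict_spec : Claim_equal_litToDict := by
  intro st dictName _
  unfold Spec_litToDict litToDict litToDict_alt
  dsimp only
  have h1 := A_loop dictName.toList st.toList st.toList [] [] rfl
  simp only [List.length_nil, Nat.cast_zero, List.nil_append, List.getLastD_nil] at h1
  rw [h1, wmap_groupRuns dictName.toList st.toList '_' (Or.inl (by decide))]
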